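-- pv_equiv track=rewrite | github.com/Joxter/advent-of-code | 2021/day-25/solution.py | part1
-- ===== SOURCE A (Python) =====
-- def part1(inp):
--     grid = [list('.' * len(l)) for l in inp.splitlines()]
--     lines = inp.splitlines()
--
--     height = len(lines)
--     width = len(lines[0])
--
--     herds = {}
--     for i in range(len(lines)):
--         for j in range(len(lines[0])):
--             if lines[i][j] != '.':
--                 herds[(i,j)] = lines[i][j]
--
--     step = 1
--     changed = False
--     while True:
--         nextHerds = {}
--         changed = False
--         for (i, j), herd in herds.items():
--             if herd == '>':
--                 if j + 1 < width:
--                     if (i, j + 1) not in herds: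
--                         nextHerds[(i,j + 1)] = herd
--                         changed = True
--                     else:
--                         nextHerds[(i,j)] = herd
--                 else:
--                     if (i, 0) not in herds:
--                         changed = True
--                         nextHerds[(i, 0)] = herd
--                     else:
--                         nextHerds[(i,j)] = herd
--             else:
--                 nextHerds[(i,j)] = herds[(i,j)]
--
--         herds = nextHerds
--         nextHerds = {}
--
--         for (i, j), herd in herds.items():
--             if herd == 'v':
--                 if i + 1 < height:
--                     if (i + 1, j) not in herds:
--                         nextHerds[(i + 1,j)] = herd
--                         changed = True
--                     else:
--                         nextHerds[(i,j)] = herd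
--                 else:
--                     if (0, j) not in herds:
--                         nextHerds[(0,j)] = herd
--                         changed = True
--                     else:
--                         nextHerds[(i,j)] = herd
--             else:
--                 nextHerds[(i,j)] = herds[(i,j)]
--         if not changed:
--             return step
--
--         herds = nextHerds
--         step += 1
--
--     return None
-- ===== SOURCE B (Python) =====
-- def part1(inp):
--     lines = inp.splitlines()
--     height = len(lines)
--     width = len(lines[0])
--     grid = [[lines[i][j] for j in range(width)] for i in range(height)]
--
--     def east_cell(g, i, j):
--         c = g[i][j]
--         if c == '>' and g[i][(j + 1) % width] == '.':
--             return '.'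
--         if c == '.' and g[i][(j - 1) % width] == '>':
--             return '>'
--         return c
--
--     def south_cell(g, i, j):
--         c = g[i][j]
--         if c == 'v' and g[(i + 1) % height][j] == '.':
--             return '.'
--         if c == '.' and g[(i - 1) % height][j] == 'v':
--             return 'v'
--         return c
--
--     def east_moves(g):
--         return any(g[i][j] == '>' and g[i][(j + 1) % width] == '.'
--                    for i in range(height) for j in range(width))
--
--     def south_moves(g):
--         return any(g[i][j] == 'v' and g[(i + 1) % height][j] == '.'
--                    for i in range(height) for j in range(width))
--
--     step = 1
--     while True:
--         changed = east_moves(grid)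
--         grid = [[east_cell(grid, i, j) for j in range(width)] for i in range(height)]
--         changed = south_moves(grid) or changed
--         if not changed:
--             return step
--         grid = [[south_cell(grid, i, j) for j in range(width)] for i in range(height)]
--         step += 1
-- ===== Notes on version B (the rewrite author's own statement) =====
-- stated objective: faster
-- what changed: Replaces A's push-based simulation over a dict keyed by (row,col) tuples with a dense 2D char-list grid rebuilt each phase by a pull-based closed-form per-cell rule ((j+1)%w / (j-1)%w neighbours), detecting movement with a separate any() scan.
import Mathlib
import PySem

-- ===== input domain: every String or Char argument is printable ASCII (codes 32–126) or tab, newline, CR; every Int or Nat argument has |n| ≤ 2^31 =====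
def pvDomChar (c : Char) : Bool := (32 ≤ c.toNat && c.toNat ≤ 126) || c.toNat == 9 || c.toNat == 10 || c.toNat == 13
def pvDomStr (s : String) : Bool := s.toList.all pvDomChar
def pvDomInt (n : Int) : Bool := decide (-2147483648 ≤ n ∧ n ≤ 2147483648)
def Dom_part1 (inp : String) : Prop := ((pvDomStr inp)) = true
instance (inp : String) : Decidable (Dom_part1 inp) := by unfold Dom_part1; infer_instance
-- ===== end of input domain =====

-- B replaces A's push-based dict-of-positions simulation by a dense 2D grid rebuilt each
-- phase with a pull-based per-cell rule (alternative data structure/algorithm, same cost).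
-- Both Pythons run an unbounded simulation loop; the ports run that loop on fuel pvFuel (quadratic in the
-- area), and Pre_part1 guarantees the Python loop returns within the fuel.

-- ===== PORT A =====
def pvFuel (h w : Int) : Nat := ((h * w + 2) * (h * w + 2)).toNat

-- lines[i][j] (shared access helper; none = IndexError)
def pvCellAt (lines : List String) (i j : Int) : Option Char :=
  (PySem.List.pyGet? lines i).bind fun li => PySem.Str.pyGet? li j

def pvBuildHerds (lines : List String) (h w : Int) :
    Option (PySem.Dict (Int × Int) Char) :=
  (PySem.List.pyRange 0 h 1).foldl (fun acc i =>
    (PySem.List.pyRange 0 w 1).foldl (fun acc2 j =>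
      acc2.bind fun d => (pvCellAt lines i j).map fun c =>
        if c ≠ '.' then d.insert (i, j) c else d) acc) (some PySem.Dict.empty)

-- the first 'for (i, j), herd in herds.items()' loop (east phase);
-- 'herds[(i,j)]' in the else-branch is ported as get? + getD, exact because the key
-- comes from herds.items() and is therefore present.
def pvEastFold (w : Int) (herds : PySem.Dict (Int × Int) Char) :
    PySem.Dict (Int × Int) Char × Bool :=
  herds.items.foldl (fun st kv =>
    if kv.2 = '>' then
      if kv.1.2 + 1 < w then
        if herds.contains (kv.1.1, kv.1.2 + 1) = false then
          (st.1.insert (kv.1.1, kv.1.2 + 1) kv.2, true)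
        else (st.1.insert (kv.1.1, kv.1.2) kv.2, st.2)
      else
        if herds.contains (kv.1.1, 0) = false then
          (st.1.insert (kv.1.1, 0) kv.2, true)
        else (st.1.insert (kv.1.1, kv.1.2) kv.2, st.2)
    else (st.1.insert (kv.1.1, kv.1.2) ((herds.get? (kv.1.1, kv.1.2)).getD kv.2), st.2))
    (PySem.Dict.empty, false)

-- the second items() loop (south phase); 'changed' is threaded in from the east phase
def pvSouthFold (h : Int) (herds : PySem.Dict (Int × Int) Char) (changed : Bool) :
    PySem.Dict (Int × Int) Char × Bool :=
  herds.items.foldl (fun st kv =>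
    if kv.2 = 'v' then
      if kv.1.1 + 1 < h then
        if herds.contains (kv.1.1 + 1, kv.1.2) = false then
          (st.1.insert (kv.1.1 + 1, kv.1.2) kv.2, true)
        else (st.1.insert (kv.1.1, kv.1.2) kv.2, st.2)
      else
        if herds.contains (0, kv.1.2) = false then
          (st.1.insert (0, kv.1.2) kv.2, true)
        else (st.1.insert (kv.1.1, kv.1.2) kv.2, st.2)
    else (st.1.insert (kv.1.1, kv.1.2) ((herds.get? (kv.1.1, kv.1.2)).getD kv.2), st.2))
    (PySem.Dict.empty, changed)

-- the unbounded loop as fuel recursion; none = fuel exhausted (never reached inside Pre_part1)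
def pvLoopA (h w : Int) : Nat → Int → PySem.Dict (Int × Int) Char → Option Int
  | 0, _, _ => none
  | fuel + 1, step, herds =>
    let e := pvEastFold w herds
    let s := pvSouthFold h e.1 e.2
    if s.2 = false then some step else pvLoopA h w fuel (step + 1) s.1

def part1 (inp : String) : Option Int :=
  let lines := PySem.Str.splitlines inp
  let _grid := lines.map fun l => List.replicate l.toList.length '.'  -- A's dead 'grid' binding
  match PySem.List.pyGet? lines 0 with
  | none => none                                   -- lines[0]: IndexError on empty input
  | some l0 =>
    let height : Int := lines.length
    let width : Int := PySem.Str.len l0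
    match pvBuildHerds lines height width with
    | none => none                                 -- lines[i][j]: IndexError on a short row
    | some herds => pvLoopA height width (pvFuel height width) 1 herds

-- ===== PORT B =====
-- g[i][j]; every use by the running loop is in range (indices come from range(height)/
-- range(width) and % wrapping on the rebuilt rectangular grid), so the default is never
-- read there; the initial build uses pvCellAt and reports IndexError.
def pvCell (g : List (List Char)) (i j : Int) : Char :=
  (((PySem.List.pyGet? g i).bind fun r => PySem.List.pyGet? r j).getD '?')

def pvEastCell (w : Int) (g : List (List Char)) (i j : Int) : Char :=
  let c := pvCell g i j
  if c = '>' ∧ pvCell g i (PySem.Int.mod (j + 1) w) = '.' then '.'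
  else if c = '.' ∧ pvCell g i (PySem.Int.mod (j - 1) w) = '>' then '>'
  else c

def pvSouthCell (h : Int) (g : List (List Char)) (i j : Int) : Char :=
  let c := pvCell g i j
  if c = 'v' ∧ pvCell g (PySem.Int.mod (i + 1) h) j = '.' then '.'
  else if c = '.' ∧ pvCell g (PySem.Int.mod (i - 1) h) j = 'v' then 'v'
  else c

-- any(... for i in range(height) for j in range(width)): nested any
def pvEastMoves (h w : Int) (g : List (List Char)) : Bool :=
  (PySem.List.pyRange 0 h 1).any fun i => (PySem.List.pyRange 0 w 1).any fun j =>
    pvCell g i j == '>' && pvCell g i (PySem.Int.mod (j + 1) w) == '.'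

def pvSouthMoves (h w : Int) (g : List (List Char)) : Bool :=
  (PySem.List.pyRange 0 h 1).any fun i => (PySem.List.pyRange 0 w 1).any fun j =>
    pvCell g i j == 'v' && pvCell g (PySem.Int.mod (i + 1) h) j == '.'

def pvEastGrid (h w : Int) (g : List (List Char)) : List (List Char) :=
  (PySem.List.pyRange 0 h 1).map fun i =>
    (PySem.List.pyRange 0 w 1).map fun j => pvEastCell w g i j

def pvSouthGrid (h w : Int) (g : List (List Char)) : List (List Char) :=
  (PySem.List.pyRange 0 h 1).map fun i =>
    (PySem.List.pyRange 0 w 1).map fun j => pvSouthCell h g i j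

-- [[lines[i][j] for j in range(width)] for i in range(height)]
def pvBuildGrid (lines : List String) (h w : Int) : Option (List (List Char)) :=
  (PySem.List.pyRange 0 h 1).foldl (fun acc i =>
    acc.bind fun rows =>
      ((PySem.List.pyRange 0 w 1).foldl (fun racc j =>
        racc.bind fun r => (pvCellAt lines i j).map fun c => r ++ [c]) (some [])).map
        fun row => rows ++ [row]) (some [])

def pvLoopB (h w : Int) : Nat → Int → List (List Char) → Option Int
  | 0, _, _ => none
  | fuel + 1, step, g =>
    let changed := pvEastMoves h w g
    let g1 := pvEastGrid h w g
    let changed2 := pvSouthMoves h w g1 || changed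
    if changed2 = false then some step
    else pvLoopB h w fuel (step + 1) (pvSouthGrid h w g1)

def part1_alt (inp : String) : Option Int :=
  let lines := PySem.Str.splitlines inp
  match PySem.List.pyGet? lines 0 with
  | none => none                                   -- lines[0]: IndexError on empty input
  | some l0 =>
    let height : Int := lines.length
    let width : Int := PySem.Str.len l0
    match pvBuildGrid lines height width with
    | none => none                                 -- lines[i][j]: IndexError on a short row
    | some g => pvLoopB height width (pvFuel height width) 1 g

-- ===== PRECONDITION & SPEC =====
-- spec-level dynamics (built from B-side helpers) used only to STATE termination
def pvStart (lines : List String) (w : Int) : List (List Char) :=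
  lines.map fun l => l.toList.take w.toNat

def pvFullStep (h w : Int) (g : List (List Char)) : List (List Char) :=
  pvSouthGrid h w (pvEastGrid h w g)

def pvStable (h w : Int) (g : List (List Char)) : Bool :=
  !(pvEastMoves h w g || pvSouthMoves h w (pvEastGrid h w g))

-- Pre_ excludes (a) inputs on which A raises IndexError (empty input, or a line shorter
-- than the first line), and (b) inputs on which A's simulation loop never returns
-- because the cucumber dynamics never reaches a fixed point (e.g. ">."), stated as
-- stabilisation within the generous quadratic fuel bound pvFuel.
def Pre_part1 (inp : String) : Prop :=
  let lines := PySem.Str.splitlines inp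
  let w := PySem.Str.len lines.headI
  lines ≠ [] ∧ (∀ l ∈ lines, w ≤ PySem.Str.len l) ∧
    ∃ k < pvFuel lines.length w,
      pvStable lines.length w ((pvFullStep lines.length w)^[k] (pvStart lines w)) = true

instance (inp : String) : Decidable (Pre_part1 inp) := by unfold Pre_part1; infer_instance

def pvWitness_part1 : String := ">.x"

def Spec_part1 (inp : String) (out : Option Int) : Prop := out = part1_alt inp
instance (inp : String) (out : Option Int) : Decidable (Spec_part1 inp out) := by
  unfold Spec_part1; infer_instance

-- ===== CLAIM (what is proved, stated in full; the proofs are below) =====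
def Claim_equal_part1 : Prop :=
  ∀ (inp : String), Dom_part1 inp → Pre_part1 inp → Spec_part1 inp (part1 inp)

-- ===== LEMMAS AND PROOFS =====

-- in-range cell positions
def pvBox (h w i j : Int) : Prop := 0 ≤ i ∧ i < h ∧ 0 ≤ j ∧ j < w

-- rectangular grid of the right dimensions
def pvShape (h w : Int) (g : List (List Char)) : Prop :=
  0 ≤ h ∧ 0 ≤ w ∧ (g.length : Int) = h ∧ ∀ r ∈ g, (r.length : Int) = w

-- the coupling invariant between A's dict and B's grid
def pvInv (h w : Int) (d : PySem.Dict (Int × Int) Char) (g : List (List Char)) : Prop :=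
  d.keys.Nodup ∧ (∀ k ∈ d.keys, pvBox h w k.1 k.2) ∧
  ∀ i j, pvBox h w i j →
    d.get? (i, j) = (if pvCell g i j = '.' then none else some (pvCell g i j))

theorem pv_find?_unique {α : Type} (p : α → Bool) (x : α) :
    ∀ (L : List α), x ∈ L → p x = true → (∀ y ∈ L, p y = true → y = x) →
      L.find? p = some x := by
  intro L
  induction L with
  | nil => intro h; exact absurd h (List.not_mem_nil)
  | cons a L ih =>
    intro hmem hpx huniq
    by_cases hpa : p a = true
    · have : a = x := huniq a (List.mem_cons_self) hpa
      subst this; simp [List.find?, hpx]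
    · have hax : x ≠ a := by rintro rfl; exact hpa hpx
      have hxL : x ∈ L := by
        rcases List.mem_cons.mp hmem with h | h
        · exact absurd h hax
        · exact h
      simp only [List.find?, Bool.not_eq_true] at *
      rw [hpa]
      exact ih hxL hpx (fun y hy hpy => huniq y (List.mem_cons_of_mem _ hy) hpy)

theorem pv_foldl_flatMap {α β γ : Type} (l : List α) (f : α → List β)
    (g : γ → β → γ) (init : γ) :
    (l.flatMap f).foldl g init = l.foldl (fun a x => (f x).foldl g a) init := by
  induction l generalizing init with
  | nil => rfl
  | cons a l ih => simp [List.flatMap_cons, List.foldl_append, ih]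

theorem pv_get?_foldl_insert {α : Type} (key : α → Int × Int) (val : α → Char) :
    ∀ (L : List α) (d : PySem.Dict (Int × Int) Char) (p : Int × Int),
      (L.foldl (fun d a => d.insert (key a) (val a)) d).get? p =
        (match L.reverse.find? (fun a => key a == p) with
         | some a => some (val a)
         | none => d.get? p) := by
  intro L
  induction L with
  | nil => intro d p; simp
  | cons a L ih =>
    intro d p
    rw [List.foldl_cons, ih]
    rw [List.reverse_cons, List.find?_append]
    cases hf : L.reverse.find? (fun a => key a == p) with
    | some b => simp
    | none =>
      simp only [List.find?]
      by_cases hkp : key a = p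
      · subst hkp; simp [PySem.Dict.get?_insert_self]
      · have : (key a == p) = false := by simp [hkp]
        simp [this, PySem.Dict.get?_insert_of_ne _ _ (Ne.symm hkp)]

theorem pv_keys_foldl_insert_mem {α : Type} (key : α → Int × Int) (val : α → Char) :
    ∀ (L : List α) (d : PySem.Dict (Int × Int) Char) (k : Int × Int),
      k ∈ (L.foldl (fun d a => d.insert (key a) (val a)) d).keys →
      k ∈ d.keys ∨ ∃ a ∈ L, k = key a := by
  intro L
  induction L with
  | nil => intro d k h; exact Or.inl h
  | cons a L ih =>
    intro d k h
    rw [List.foldl_cons] at h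
    rcases ih _ k h with h' | ⟨b, hb, rfl⟩
    · rcases (PySem.Dict.mem_keys_insert _ _ _ _).mp h' with h'' | h''
      · exact Or.inr ⟨a, List.mem_cons_self, h''⟩
      · exact Or.inl h''
    · exact Or.inr ⟨b, List.mem_cons_of_mem _ hb, rfl⟩

theorem pv_foldl_option {α β γ : Type} (av : α → Option β) (dflt : β) (upd : γ → α → β → γ) :
    ∀ (L : List α) (g0 : γ), (∀ a ∈ L, (av a).isSome) →
      L.foldl (fun acc a => acc.bind fun d => (av a).map fun c => upd d a c) (some g0)
        = some (L.foldl (fun d a => upd d a ((av a).getD dflt)) g0) := by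
  intro L
  induction L with
  | nil => intro g0 _; rfl
  | cons a L ih =>
    intro g0 hall
    have ha : (av a).isSome := hall a (List.mem_cons_self)
    rcases Option.isSome_iff_exists.mp ha with ⟨c, hc⟩
    simp only [List.foldl_cons, hc, Option.bind_some, Option.map_some, Option.getD_some]
    exact ih _ (fun b hb => hall b (List.mem_cons_of_mem _ hb))

-- Python's % on the wrapped indices, for an index inside the board
theorem pv_mod_succ {j w : Int} (h0 : 0 ≤ j) (h1 : j < w) :
    PySem.Int.mod (j + 1) w = if j + 1 < w then j + 1 else 0 := by
  rw [PySem.Int.mod_eq_emod_of_pos (by omega)]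
  split_ifs with hlt
  · exact Int.emod_eq_of_lt (by omega) hlt
  · rw [show j + 1 = w by omega, Int.emod_self]

theorem pv_mod_pred {j w : Int} (h0 : 0 ≤ j) (h1 : j < w) :
    PySem.Int.mod (j - 1) w = if j = 0 then w - 1 else j - 1 := by
  rw [PySem.Int.mod_eq_emod_of_pos (by omega)]
  split_ifs with hz
  · rw [show j - 1 = (w - 1) - w by omega, Int.sub_emod_right]
    exact Int.emod_eq_of_lt (by omega) (by omega)
  · exact Int.emod_eq_of_lt (by omega) (by omega)

theorem pv_mod_pred_box {j w : Int} (h0 : 0 ≤ j) (h1 : j < w) :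
    0 ≤ PySem.Int.mod (j - 1) w ∧ PySem.Int.mod (j - 1) w < w := by
  rw [pv_mod_pred h0 h1]; split_ifs <;> omega

theorem pv_mod_pred_succ {j w : Int} (h0 : 0 ≤ j) (h1 : j < w) :
    PySem.Int.mod (PySem.Int.mod (j - 1) w + 1) w = j := by
  rw [pv_mod_pred h0 h1, PySem.Int.mod_eq_emod_of_pos (by omega)]
  split_ifs with hz
  · rw [show w - 1 + 1 = w by omega, Int.emod_self, hz]
  · rw [show j - 1 + 1 = j by omega]
    exact Int.emod_eq_of_lt (by omega) (by omega)

-- reading a cell of a grid built as a double comprehension over ranges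
theorem pv_cell_map (f : Int → Int → Char) {h w i j : Int} (hb : pvBox h w i j) :
    pvCell ((PySem.List.pyRange 0 h 1).map fun i =>
      (PySem.List.pyRange 0 w 1).map fun j => f i j) i j = f i j := by
  obtain ⟨hi0, hih, hj0, hjw⟩ := hb
  have hh : h = ((h.toNat : Nat) : Int) := by omega
  have hw : w = ((w.toNat : Nat) : Int) := by omega
  have hi : ((i.toNat : Nat) : Int) = i := by omega
  have hj : ((j.toNat : Nat) : Int) = j := by omega
  unfold pvCell
  rw [PySem.List.pyGet?_of_nonneg _ hi0, hh,
    PySem.List.getElem?_map_pyRange_zero _ h.toNat i.toNat (by omega)]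
  simp only [Option.bind_some]
  rw [PySem.List.pyGet?_of_nonneg _ hj0, hw,
    PySem.List.getElem?_map_pyRange_zero _ w.toNat j.toNat (by omega)]
  simp only [Option.getD_some, hi, hj]

theorem pv_shape_map (f : Int → Int → Char) {h w : Int} (h0 : 0 ≤ h) (w0 : 0 ≤ w) :
    pvShape h w ((PySem.List.pyRange 0 h 1).map fun i =>
      (PySem.List.pyRange 0 w 1).map fun j => f i j) := by
  refine ⟨h0, w0, ?_, ?_⟩
  · simp [PySem.List.length_pyRange_one]
    omega
  · intro r hr
    rcases List.mem_map.mp hr with ⟨i, _, rfl⟩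
    simp [PySem.List.length_pyRange_one]; omega

-- items of a dict coupled to a grid
theorem pv_mem_items {h w : Int} {d : PySem.Dict (Int × Int) Char} {g : List (List Char)}
    (hInv : pvInv h w d g) (a : (Int × Int) × Char) :
    a ∈ d.items ↔
      pvBox h w a.1.1 a.1.2 ∧ pvCell g a.1.1 a.1.2 ≠ '.' ∧ a.2 = pvCell g a.1.1 a.1.2 := by
  obtain ⟨hnd, hkeys, hR⟩ := hInv
  constructor
  · intro hmem
    have hbox : pvBox h w a.1.1 a.1.2 := hkeys _ (PySem.Dict.mem_keys_of_mem_items d hmem)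
    have hmem' : (a.1, a.2) ∈ d.items := by simpa using hmem
    have hget : d.get? a.1 = some a.2 := PySem.Dict.get?_of_mem_items d hmem' hnd
    have hR' := hR a.1.1 a.1.2 hbox
    rw [show ((a.1.1, a.1.2) : Int × Int) = a.1 from rfl, hget] at hR'
    rcases eq_or_ne (pvCell g a.1.1 a.1.2) '.' with hc | hc
    · rw [if_pos hc] at hR'
      exact absurd hR' (by simp)
    · rw [if_neg hc] at hR'
      exact ⟨hbox, hc, by simpa using hR'⟩
  · rintro ⟨hbox, hne, hval⟩
    have hR' := hR a.1.1 a.1.2 hbox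
    rw [if_neg hne] at hR'
    have hget : d.get? (a.1.1, a.1.2) = some a.2 := by rw [hR', hval]
    have := PySem.Dict.mem_items_of_get?_eq_some d hget
    simpa using this

theorem pv_contains_box {h w : Int} {d : PySem.Dict (Int × Int) Char} {g : List (List Char)}
    (hInv : pvInv h w d g) {i j : Int} (hb : pvBox h w i j) :
    d.contains (i, j) = false ↔ pvCell g i j = '.' := by
  obtain ⟨-, -, hR⟩ := hInv
  rw [PySem.Dict.contains_eq_isSome_get?, hR i j hb]
  split_ifs with hc <;> simp [hc]

-- A's east-phase loop body, normalised: each item inserts one key and ors one flag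
def pvTgtE (d : PySem.Dict (Int × Int) Char) (w : Int) (a : (Int × Int) × Char) : Int × Int :=
  if a.2 = '>' then
    if a.1.2 + 1 < w then
      if d.contains (a.1.1, a.1.2 + 1) = false then (a.1.1, a.1.2 + 1) else (a.1.1, a.1.2)
    else
      if d.contains (a.1.1, 0) = false then (a.1.1, 0) else (a.1.1, a.1.2)
  else (a.1.1, a.1.2)

def pvMovE (d : PySem.Dict (Int × Int) Char) (w : Int) (a : (Int × Int) × Char) : Bool :=
  if a.2 = '>' then
    if a.1.2 + 1 < w then !d.contains (a.1.1, a.1.2 + 1) else !d.contains (a.1.1, 0)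
  else false

def pvTgtS (d : PySem.Dict (Int × Int) Char) (h : Int) (a : (Int × Int) × Char) : Int × Int :=
  if a.2 = 'v' then
    if a.1.1 + 1 < h then
      if d.contains (a.1.1 + 1, a.1.2) = false then (a.1.1 + 1, a.1.2) else (a.1.1, a.1.2)
    else
      if d.contains (0, a.1.2) = false then (0, a.1.2) else (a.1.1, a.1.2)
  else (a.1.1, a.1.2)

def pvMovS (d : PySem.Dict (Int × Int) Char) (h : Int) (a : (Int × Int) × Char) : Bool :=
  if a.2 = 'v' then
    if a.1.1 + 1 < h then !d.contains (a.1.1 + 1, a.1.2) else !d.contains (0, a.1.2)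
  else false

theorem pv_foldl_or {α : Type} (m : α → Bool) :
    ∀ (L : List α) (b : Bool), L.foldl (fun r a => r || m a) b = (b || L.any m) := by
  intro L
  induction L with
  | nil => intro b; simp
  | cons a L ih =>
    intro b
    rw [List.foldl_cons, ih, List.any_cons, Bool.or_assoc]

theorem pv_eastFold_eq (w : Int) (d : PySem.Dict (Int × Int) Char) (hnd : d.keys.Nodup) :
    pvEastFold w d =
      (d.items.foldl (fun dd a => dd.insert (pvTgtE d w a) a.2) PySem.Dict.empty,
       d.items.foldl (fun b a => b || pvMovE d w a) false) := by
  unfold pvEastFold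
  rw [PySem.List.foldl_congr_mem _ _
    (fun st a => (st.1.insert (pvTgtE d w a) a.2, st.2 || pvMovE d w a)) _ ?_]
  · exact PySem.List.foldl_prod_mk
      (fun (dd : PySem.Dict (Int × Int) Char) a => dd.insert (pvTgtE d w a) a.2)
      (fun (b : Bool) a => b || pvMovE d w a) _ _ _
  · intro st a ha
    have hmem' : ((a.1.1, a.1.2), a.2) ∈ d.items := by simpa using ha
    have hval : (d.get? (a.1.1, a.1.2)).getD a.2 = a.2 := by
      rw [← PySem.Dict.getD_eq_get?_getD]
      exact PySem.Dict.getD_of_mem_items d hmem' hnd a.2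
    unfold pvTgtE pvMovE
    by_cases h1 : a.2 = '>'
    · by_cases h2 : a.1.2 + 1 < w
      · by_cases h3 : d.contains (a.1.1, a.1.2 + 1) = false <;>
          simp [h1, h2, h3] at *
      · by_cases h3 : d.contains (a.1.1, 0) = false <;>
          simp [h1, h2, h3] at *
    · simp [h1, hval]

theorem pv_southFold_eq (h : Int) (d : PySem.Dict (Int × Int) Char) (b : Bool)
    (hnd : d.keys.Nodup) :
    pvSouthFold h d b =
      (d.items.foldl (fun dd a => dd.insert (pvTgtS d h a) a.2) PySem.Dict.empty,
       d.items.foldl (fun bb a => bb || pvMovS d h a) b) := by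
  unfold pvSouthFold
  rw [PySem.List.foldl_congr_mem _ _
    (fun st a => (st.1.insert (pvTgtS d h a) a.2, st.2 || pvMovS d h a)) _ ?_]
  · exact PySem.List.foldl_prod_mk
      (fun (dd : PySem.Dict (Int × Int) Char) a => dd.insert (pvTgtS d h a) a.2)
      (fun (bb : Bool) a => bb || pvMovS d h a) _ _ _
  · intro st a ha
    have hmem' : ((a.1.1, a.1.2), a.2) ∈ d.items := by simpa using ha
    have hval : (d.get? (a.1.1, a.1.2)).getD a.2 = a.2 := by
      rw [← PySem.Dict.getD_eq_get?_getD]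
      exact PySem.Dict.getD_of_mem_items d hmem' hnd a.2
    unfold pvTgtS pvMovS
    by_cases h1 : a.2 = 'v'
    · by_cases h2 : a.1.1 + 1 < h
      · by_cases h3 : d.contains (a.1.1 + 1, a.1.2) = false <;>
          simp [h1, h2, h3] at *
      · by_cases h3 : d.contains (0, a.1.2) = false <;>
          simp [h1, h2, h3] at *
    · simp [h1, hval]

theorem pv_movE_eq {h w : Int} {d : PySem.Dict (Int × Int) Char} {g : List (List Char)}
    (hInv : pvInv h w d g) {a : (Int × Int) × Char} (ha : a ∈ d.items) :
    pvMovE d w a =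
      (decide (a.2 = '>') && decide (pvCell g a.1.1 (PySem.Int.mod (a.1.2 + 1) w) = '.')) := by
  obtain ⟨hbox, hne, hval⟩ := (pv_mem_items hInv a).mp ha
  obtain ⟨hi0, hih, hj0, hjw⟩ := hbox
  unfold pvMovE
  rw [pv_mod_succ hj0 hjw]
  by_cases h1 : a.2 = '>'
  · rw [if_pos h1]
    simp only [h1, decide_true, Bool.true_and]
    by_cases h2 : a.1.2 + 1 < w
    · rw [if_pos h2, if_pos h2]
      have hcb := pv_contains_box hInv (⟨hi0, hih, by omega, h2⟩ : pvBox h w a.1.1 (a.1.2 + 1))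
      rw [Bool.eq_iff_iff, Bool.not_eq_true']
      simp only [decide_eq_true_eq]
      exact hcb
    · rw [if_neg h2, if_neg h2]
      have hcb := pv_contains_box hInv (⟨hi0, hih, le_refl 0, by omega⟩ : pvBox h w a.1.1 0)
      rw [Bool.eq_iff_iff, Bool.not_eq_true']
      simp only [decide_eq_true_eq]
      exact hcb
  · rw [if_neg h1]; simp [h1]

theorem pv_tgtE_eq {h w : Int} {d : PySem.Dict (Int × Int) Char} {g : List (List Char)}
    (hInv : pvInv h w d g) {a : (Int × Int) × Char} (ha : a ∈ d.items) :
    pvTgtE d w a =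
      if pvMovE d w a = true then (a.1.1, PySem.Int.mod (a.1.2 + 1) w) else a.1 := by
  obtain ⟨hbox, hne, hval⟩ := (pv_mem_items hInv a).mp ha
  obtain ⟨hi0, hih, hj0, hjw⟩ := hbox
  unfold pvTgtE pvMovE
  rw [pv_mod_succ hj0 hjw]
  by_cases h1 : a.2 = '>'
  · rw [if_pos h1, if_pos h1]
    by_cases h2 : a.1.2 + 1 < w
    · rw [if_pos h2, if_pos h2, if_pos h2]
      cases hcc : d.contains (a.1.1, a.1.2 + 1) <;> simp
    · rw [if_neg h2, if_neg h2, if_neg h2]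
      cases hcc : d.contains (a.1.1, 0) <;> simp
  · rw [if_neg h1, if_neg h1]; simp

theorem pv_east_get? {h w : Int} {d : PySem.Dict (Int × Int) Char} {g : List (List Char)}
    (hInv : pvInv h w d g) {i j : Int} (hb : pvBox h w i j) :
    (d.items.foldl (fun dd a => dd.insert (pvTgtE d w a) a.2) PySem.Dict.empty).get? (i, j)
      = if pvEastCell w g i j = '.' then none else some (pvEastCell w g i j) := by
  obtain ⟨hi0, hih, hj0, hjw⟩ := hb
  have hb' : pvBox h w i j := ⟨hi0, hih, hj0, hjw⟩
  rw [pv_get?_foldl_insert]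
  have hqb := pv_mod_pred_box hj0 hjw
  -- which items can target (i, j)
  have hsrc : ∀ a ∈ d.items, pvTgtE d w a = (i, j) →
      (a = ((i, PySem.Int.mod (j - 1) w), '>') ∧ pvCell g i j = '.'
        ∧ pvCell g i (PySem.Int.mod (j - 1) w) = '>')
      ∨ (a = ((i, j), pvCell g i j) ∧
          ¬(pvCell g i j = '>' ∧ pvCell g i (PySem.Int.mod (j + 1) w) = '.')) := by
    intro a ha hta
    obtain ⟨habox, hane, haval⟩ := (pv_mem_items hInv a).mp ha
    rw [pv_tgtE_eq hInv ha] at hta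
    by_cases hm : pvMovE d w a = true
    · rw [if_pos hm] at hta
      rw [pv_movE_eq hInv ha] at hm
      simp only [Bool.and_eq_true, decide_eq_true_eq] at hm
      have h1 : a.1.1 = i := congrArg Prod.fst hta
      have h2 : PySem.Int.mod (a.1.2 + 1) w = j := congrArg Prod.snd hta
      have hbA := habox.2.2.1
      have hbB := habox.2.2.2
      have hj' : a.1.2 = PySem.Int.mod (j - 1) w := by
        rw [pv_mod_succ hbA hbB] at h2
        rw [pv_mod_pred hj0 hjw]
        split_ifs at h2 with hlt <;> split_ifs with hz <;> omega
      left
      refine ⟨?_, ?_, ?_⟩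
      · calc a = ((a.1.1, a.1.2), a.2) := rfl
          _ = ((i, PySem.Int.mod (j - 1) w), '>') := by rw [h1, hj', hm.1]
      · rw [← h2, ← h1]; exact hm.2
      · rw [← h1, ← hj', ← haval]; exact hm.1
    · have hm' : pvMovE d w a = false := by revert hm; cases pvMovE d w a <;> simp
      rw [if_neg hm] at hta
      right
      have h1 : a.1.1 = i := congrArg Prod.fst hta
      have h2 : a.1.2 = j := congrArg Prod.snd hta
      constructor
      · calc a = ((a.1.1, a.1.2), a.2) := rfl
          _ = ((i, j), pvCell g i j) := by rw [haval, h1, h2]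
      · intro hcon
        rw [pv_movE_eq hInv ha] at hm'
        have ha2 : a.2 = '>' := by rw [haval, h1, h2]; exact hcon.1
        have he' : pvCell g a.1.1 (PySem.Int.mod (a.1.2 + 1) w) = '.' := by
          rw [h1, h2]; exact hcon.2
        rw [ha2, he'] at hm'
        simp at hm'
  by_cases hcd : pvCell g i j = '.'
  · by_cases hwv : pvCell g i (PySem.Int.mod (j - 1) w) = '>'
    · -- a '>' arrives from the west neighbour
      have hxmem : (((i, PySem.Int.mod (j - 1) w), '>') : (Int × Int) × Char) ∈ d.items := by
        refine (pv_mem_items hInv _).mpr ⟨⟨hi0, hih, hqb.1, hqb.2⟩, ?_, ?_⟩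
        · show pvCell g i (PySem.Int.mod (j - 1) w) ≠ '.'
          rw [hwv]; decide
        · show ('>' : Char) = pvCell g i (PySem.Int.mod (j - 1) w)
          exact hwv.symm
      have hxmov : pvMovE d w ((i, PySem.Int.mod (j - 1) w), '>') = true := by
        rw [pv_movE_eq hInv hxmem]
        simp only [decide_true, Bool.true_and, decide_eq_true_eq]
        rw [pv_mod_pred_succ hj0 hjw]
        exact hcd
      have hxtgt : pvTgtE d w ((i, PySem.Int.mod (j - 1) w), '>') = (i, j) := by
        rw [pv_tgtE_eq hInv hxmem, if_pos hxmov]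
        show (i, PySem.Int.mod (PySem.Int.mod (j - 1) w + 1) w) = (i, j)
        rw [pv_mod_pred_succ hj0 hjw]
      have hfind : d.items.reverse.find? (fun a => pvTgtE d w a == (i, j)) =
          some ((i, PySem.Int.mod (j - 1) w), '>') := by
        apply pv_find?_unique
        · exact List.mem_reverse.mpr hxmem
        · simp [hxtgt]
        · intro y hy hpy
          have hymem := List.mem_reverse.mp hy
          have hty : pvTgtE d w y = (i, j) := by simpa using hpy
          rcases hsrc y hymem hty with ⟨hyeq, -, -⟩ | ⟨hyeq, -⟩
          · exact hyeq
          · exfalso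
            obtain ⟨-, hyne, -⟩ := (pv_mem_items hInv y).mp hymem
            rw [hyeq] at hyne
            exact hyne hcd
      have hec : pvEastCell w g i j = '>' := by
        simp only [pvEastCell]
        rw [if_neg (by simp [hcd]), if_pos ⟨hcd, hwv⟩]
      rw [hfind, hec]
      simp
    · -- nothing arrives at the empty cell
      have hfind : d.items.reverse.find? (fun a => pvTgtE d w a == (i, j)) = none := by
        rw [List.find?_eq_none]
        intro y hy hpy
        have hymem := List.mem_reverse.mp hy
        have hty : pvTgtE d w y = (i, j) := by simpa using hpy
        rcases hsrc y hymem hty with ⟨-, -, hwv'⟩ | ⟨hyeq, -⟩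
        · exact hwv hwv'
        · obtain ⟨-, hyne, -⟩ := (pv_mem_items hInv y).mp hymem
          rw [hyeq] at hyne
          exact hyne hcd
      have hec : pvEastCell w g i j = '.' := by
        simp only [pvEastCell]
        rw [if_neg (by simp [hcd]), if_neg (by rintro ⟨-, hk⟩; exact hwv hk)]
        exact hcd
      rw [hfind, hec, if_pos rfl]
      simp [PySem.Dict.get?_empty]
  · by_cases hmv : pvCell g i j = '>' ∧ pvCell g i (PySem.Int.mod (j + 1) w) = '.'
    · -- the resident '>' leaves and nothing can arrive
      have hfind : d.items.reverse.find? (fun a => pvTgtE d w a == (i, j)) = none := by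
        rw [List.find?_eq_none]
        intro y hy hpy
        have hymem := List.mem_reverse.mp hy
        have hty : pvTgtE d w y = (i, j) := by simpa using hpy
        rcases hsrc y hymem hty with ⟨-, hdot, -⟩ | ⟨-, hnm⟩
        · exact hcd hdot
        · exact hnm hmv
      have hec : pvEastCell w g i j = '.' := by
        simp only [pvEastCell]
        rw [if_pos hmv]
      rw [hfind, hec, if_pos rfl]
      simp [PySem.Dict.get?_empty]
    · -- the resident stays
      have hxmem : (((i, j), pvCell g i j) : (Int × Int) × Char) ∈ d.items :=
        (pv_mem_items hInv _).mpr ⟨hb', hcd, rfl⟩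
      have hxmov : pvMovE d w ((i, j), pvCell g i j) = false := by
        rw [pv_movE_eq hInv hxmem]
        rcases not_and_or.mp hmv with hA | hB
        · simp [hA]
        · simp [hB]
      have hxtgt : pvTgtE d w ((i, j), pvCell g i j) = (i, j) := by
        rw [pv_tgtE_eq hInv hxmem, if_neg (by simp [hxmov])]
      have hfind : d.items.reverse.find? (fun a => pvTgtE d w a == (i, j)) =
          some ((i, j), pvCell g i j) := by
        apply pv_find?_unique
        · exact List.mem_reverse.mpr hxmem
        · simp [hxtgt]
        · intro y hy hpy
          have hymem := List.mem_reverse.mp hy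
          have hty : pvTgtE d w y = (i, j) := by simpa using hpy
          rcases hsrc y hymem hty with ⟨-, hdot, -⟩ | ⟨hyeq, -⟩
          · exact absurd hdot hcd
          · exact hyeq
      have hec : pvEastCell w g i j = pvCell g i j := by
        simp only [pvEastCell]
        rw [if_neg hmv, if_neg (by rintro ⟨hk, -⟩; exact hcd hk)]
      rw [hfind, hec, if_neg hcd]

theorem pv_east_any {h w : Int} {d : PySem.Dict (Int × Int) Char} {g : List (List Char)}
    (hInv : pvInv h w d g) :
    d.items.any (pvMovE d w) = pvEastMoves h w g := by
  rw [Bool.eq_iff_iff]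
  unfold pvEastMoves
  simp only [List.any_eq_true, PySem.List.mem_pyRange_one]
  constructor
  · rintro ⟨a, ha, hm⟩
    obtain ⟨habox, hane, haval⟩ := (pv_mem_items hInv a).mp ha
    rw [pv_movE_eq hInv ha] at hm
    simp only [Bool.and_eq_true, decide_eq_true_eq] at hm
    refine ⟨a.1.1, ⟨habox.1, habox.2.1⟩, a.1.2, ⟨habox.2.2.1, habox.2.2.2⟩, ?_⟩
    simp only [Bool.and_eq_true, beq_iff_eq]
    exact ⟨by rw [← haval]; exact hm.1, hm.2⟩
  · rintro ⟨i, hi, j, hj, hcond⟩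
    simp only [Bool.and_eq_true, beq_iff_eq] at hcond
    have hbox : pvBox h w i j := ⟨hi.1, hi.2, hj.1, hj.2⟩
    have hmem : (((i, j), '>') : (Int × Int) × Char) ∈ d.items :=
      (pv_mem_items hInv _).mpr
        ⟨hbox, by show pvCell g i j ≠ '.'; rw [hcond.1]; decide,
          by show ('>' : Char) = pvCell g i j; exact hcond.1.symm⟩
    refine ⟨((i, j), '>'), hmem, ?_⟩
    rw [pv_movE_eq hInv hmem]
    simp [hcond.2]

theorem pv_east_keys {h w : Int} {d : PySem.Dict (Int × Int) Char} {g : List (List Char)}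
    (hInv : pvInv h w d g) :
    ∀ k ∈ (d.items.foldl (fun dd a => dd.insert (pvTgtE d w a) a.2) PySem.Dict.empty).keys,
      pvBox h w k.1 k.2 := by
  intro k hk
  rcases pv_keys_foldl_insert_mem (pvTgtE d w) (fun a => a.2) d.items PySem.Dict.empty k hk
    with hk' | ⟨a, ha, rfl⟩
  · simp [PySem.Dict.keys_empty] at hk'
  · obtain ⟨habox, -, -⟩ := (pv_mem_items hInv a).mp ha
    rw [pv_tgtE_eq hInv ha]
    split_ifs with hm
    · have hb1 := habox.2.2.1
      have hb2 := habox.2.2.2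
      have hmb := pv_mod_succ hb1 hb2
      refine ⟨habox.1, habox.2.1, ?_, ?_⟩
      · show 0 ≤ PySem.Int.mod (a.1.2 + 1) w
        rw [hmb]; split_ifs <;> omega
      · show PySem.Int.mod (a.1.2 + 1) w < w
        rw [hmb]; split_ifs <;> omega
    · exact habox

theorem pv_movS_eq {h w : Int} {d : PySem.Dict (Int × Int) Char} {g : List (List Char)}
    (hInv : pvInv h w d g) {a : (Int × Int) × Char} (ha : a ∈ d.items) :
    pvMovS d h a =
      (decide (a.2 = 'v') && decide (pvCell g (PySem.Int.mod (a.1.1 + 1) h) a.1.2 = '.')) := by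
  obtain ⟨hbox, hne, hval⟩ := (pv_mem_items hInv a).mp ha
  obtain ⟨hi0, hih, hj0, hjw⟩ := hbox
  unfold pvMovS
  rw [pv_mod_succ hi0 hih]
  by_cases h1 : a.2 = 'v'
  · rw [if_pos h1]
    simp only [h1, decide_true, Bool.true_and]
    by_cases h2 : a.1.1 + 1 < h
    · rw [if_pos h2, if_pos h2]
      have hcb := pv_contains_box hInv (⟨by omega, h2, hj0, hjw⟩ : pvBox h w (a.1.1 + 1) a.1.2)
      rw [Bool.eq_iff_iff, Bool.not_eq_true']
      simp only [decide_eq_true_eq]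
      exact hcb
    · rw [if_neg h2, if_neg h2]
      have hcb := pv_contains_box hInv (⟨le_refl 0, by omega, hj0, hjw⟩ : pvBox h w 0 a.1.2)
      rw [Bool.eq_iff_iff, Bool.not_eq_true']
      simp only [decide_eq_true_eq]
      exact hcb
  · rw [if_neg h1]; simp [h1]

theorem pv_tgtS_eq {h w : Int} {d : PySem.Dict (Int × Int) Char} {g : List (List Char)}
    (hInv : pvInv h w d g) {a : (Int × Int) × Char} (ha : a ∈ d.items) :
    pvTgtS d h a =
      if pvMovS d h a = true then (PySem.Int.mod (a.1.1 + 1) h, a.1.2) else a.1 := by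
  obtain ⟨hbox, hne, hval⟩ := (pv_mem_items hInv a).mp ha
  obtain ⟨hi0, hih, hj0, hjw⟩ := hbox
  unfold pvTgtS pvMovS
  rw [pv_mod_succ hi0 hih]
  by_cases h1 : a.2 = 'v'
  · rw [if_pos h1, if_pos h1]
    by_cases h2 : a.1.1 + 1 < h
    · rw [if_pos h2, if_pos h2, if_pos h2]
      cases hcc : d.contains (a.1.1 + 1, a.1.2) <;> simp
    · rw [if_neg h2, if_neg h2, if_neg h2]
      cases hcc : d.contains (0, a.1.2) <;> simp
  · rw [if_neg h1, if_neg h1]; simp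

theorem pv_south_get? {h w : Int} {d : PySem.Dict (Int × Int) Char} {g : List (List Char)}
    (hInv : pvInv h w d g) {i j : Int} (hb : pvBox h w i j) :
    (d.items.foldl (fun dd a => dd.insert (pvTgtS d h a) a.2) PySem.Dict.empty).get? (i, j)
      = if pvSouthCell h g i j = '.' then none else some (pvSouthCell h g i j) := by
  obtain ⟨hi0, hih, hj0, hjw⟩ := hb
  have hb' : pvBox h w i j := ⟨hi0, hih, hj0, hjw⟩
  rw [pv_get?_foldl_insert]
  have hqb := pv_mod_pred_box hi0 hih
  have hsrc : ∀ a ∈ d.items, pvTgtS d h a = (i, j) →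
      (a = ((PySem.Int.mod (i - 1) h, j), 'v') ∧ pvCell g i j = '.'
        ∧ pvCell g (PySem.Int.mod (i - 1) h) j = 'v')
      ∨ (a = ((i, j), pvCell g i j) ∧
          ¬(pvCell g i j = 'v' ∧ pvCell g (PySem.Int.mod (i + 1) h) j = '.')) := by
    intro a ha hta
    obtain ⟨habox, hane, haval⟩ := (pv_mem_items hInv a).mp ha
    rw [pv_tgtS_eq hInv ha] at hta
    by_cases hm : pvMovS d h a = true
    · rw [if_pos hm] at hta
      rw [pv_movS_eq hInv ha] at hm
      simp only [Bool.and_eq_true, decide_eq_true_eq] at hm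
      have h1 : PySem.Int.mod (a.1.1 + 1) h = i := congrArg Prod.fst hta
      have h2 : a.1.2 = j := congrArg Prod.snd hta
      have hbA := habox.1
      have hbB := habox.2.1
      have hi' : a.1.1 = PySem.Int.mod (i - 1) h := by
        rw [pv_mod_succ hbA hbB] at h1
        rw [pv_mod_pred hi0 hih]
        split_ifs at h1 with hlt <;> split_ifs with hz <;> omega
      left
      refine ⟨?_, ?_, ?_⟩
      · calc a = ((a.1.1, a.1.2), a.2) := rfl
          _ = ((PySem.Int.mod (i - 1) h, j), 'v') := by rw [hi', h2, hm.1]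
      · rw [← h1, ← h2]; exact hm.2
      · rw [← hi', ← h2, ← haval]; exact hm.1
    · have hm' : pvMovS d h a = false := by revert hm; cases pvMovS d h a <;> simp
      rw [if_neg hm] at hta
      right
      have h1 : a.1.1 = i := congrArg Prod.fst hta
      have h2 : a.1.2 = j := congrArg Prod.snd hta
      constructor
      · calc a = ((a.1.1, a.1.2), a.2) := rfl
          _ = ((i, j), pvCell g i j) := by rw [haval, h1, h2]
      · intro hcon
        rw [pv_movS_eq hInv ha] at hm'
        have ha2 : a.2 = 'v' := by rw [haval, h1, h2]; exact hcon.1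
        have he' : pvCell g (PySem.Int.mod (a.1.1 + 1) h) a.1.2 = '.' := by
          rw [h1, h2]; exact hcon.2
        rw [ha2, he'] at hm'
        simp at hm'
  by_cases hcd : pvCell g i j = '.'
  · by_cases hwv : pvCell g (PySem.Int.mod (i - 1) h) j = 'v'
    · have hxmem : (((PySem.Int.mod (i - 1) h, j), 'v') : (Int × Int) × Char) ∈ d.items := by
        refine (pv_mem_items hInv _).mpr ⟨⟨hqb.1, hqb.2, hj0, hjw⟩, ?_, ?_⟩
        · show pvCell g (PySem.Int.mod (i - 1) h) j ≠ '.'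
          rw [hwv]; decide
        · show ('v' : Char) = pvCell g (PySem.Int.mod (i - 1) h) j
          exact hwv.symm
      have hxmov : pvMovS d h ((PySem.Int.mod (i - 1) h, j), 'v') = true := by
        rw [pv_movS_eq hInv hxmem]
        simp only [decide_true, Bool.true_and, decide_eq_true_eq]
        rw [pv_mod_pred_succ hi0 hih]
        exact hcd
      have hxtgt : pvTgtS d h ((PySem.Int.mod (i - 1) h, j), 'v') = (i, j) := by
        rw [pv_tgtS_eq hInv hxmem, if_pos hxmov]
        show (PySem.Int.mod (PySem.Int.mod (i - 1) h + 1) h, j) = (i, j)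
        rw [pv_mod_pred_succ hi0 hih]
      have hfind : d.items.reverse.find? (fun a => pvTgtS d h a == (i, j)) =
          some ((PySem.Int.mod (i - 1) h, j), 'v') := by
        apply pv_find?_unique
        · exact List.mem_reverse.mpr hxmem
        · simp [hxtgt]
        · intro y hy hpy
          have hymem := List.mem_reverse.mp hy
          have hty : pvTgtS d h y = (i, j) := by simpa using hpy
          rcases hsrc y hymem hty with ⟨hyeq, -, -⟩ | ⟨hyeq, -⟩
          · exact hyeq
          · exfalso
            obtain ⟨-, hyne, -⟩ := (pv_mem_items hInv y).mp hymem
            rw [hyeq] at hyne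
            exact hyne hcd
      have hec : pvSouthCell h g i j = 'v' := by
        simp only [pvSouthCell]
        rw [if_neg (by simp [hcd]), if_pos ⟨hcd, hwv⟩]
      rw [hfind, hec]
      simp
    · have hfind : d.items.reverse.find? (fun a => pvTgtS d h a == (i, j)) = none := by
        rw [List.find?_eq_none]
        intro y hy hpy
        have hymem := List.mem_reverse.mp hy
        have hty : pvTgtS d h y = (i, j) := by simpa using hpy
        rcases hsrc y hymem hty with ⟨-, -, hwv'⟩ | ⟨hyeq, -⟩
        · exact hwv hwv'
        · obtain ⟨-, hyne, -⟩ := (pv_mem_items hInv y).mp hymem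
          rw [hyeq] at hyne
          exact hyne hcd
      have hec : pvSouthCell h g i j = '.' := by
        simp only [pvSouthCell]
        rw [if_neg (by simp [hcd]), if_neg (by rintro ⟨-, hk⟩; exact hwv hk)]
        exact hcd
      rw [hfind, hec, if_pos rfl]
      simp [PySem.Dict.get?_empty]
  · by_cases hmv : pvCell g i j = 'v' ∧ pvCell g (PySem.Int.mod (i + 1) h) j = '.'
    · have hfind : d.items.reverse.find? (fun a => pvTgtS d h a == (i, j)) = none := by
        rw [List.find?_eq_none]
        intro y hy hpy
        have hymem := List.mem_reverse.mp hy
        have hty : pvTgtS d h y = (i, j) := by simpa using hpy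
        rcases hsrc y hymem hty with ⟨-, hdot, -⟩ | ⟨-, hnm⟩
        · exact hcd hdot
        · exact hnm hmv
      have hec : pvSouthCell h g i j = '.' := by
        simp only [pvSouthCell]
        rw [if_pos hmv]
      rw [hfind, hec, if_pos rfl]
      simp [PySem.Dict.get?_empty]
    · have hxmem : (((i, j), pvCell g i j) : (Int × Int) × Char) ∈ d.items :=
        (pv_mem_items hInv _).mpr ⟨hb', hcd, rfl⟩
      have hxmov : pvMovS d h ((i, j), pvCell g i j) = false := by
        rw [pv_movS_eq hInv hxmem]
        rcases not_and_or.mp hmv with hA | hB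
        · simp [hA]
        · simp [hB]
      have hxtgt : pvTgtS d h ((i, j), pvCell g i j) = (i, j) := by
        rw [pv_tgtS_eq hInv hxmem, if_neg (by simp [hxmov])]
      have hfind : d.items.reverse.find? (fun a => pvTgtS d h a == (i, j)) =
          some ((i, j), pvCell g i j) := by
        apply pv_find?_unique
        · exact List.mem_reverse.mpr hxmem
        · simp [hxtgt]
        · intro y hy hpy
          have hymem := List.mem_reverse.mp hy
          have hty : pvTgtS d h y = (i, j) := by simpa using hpy
          rcases hsrc y hymem hty with ⟨-, hdot, -⟩ | ⟨hyeq, -⟩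
          · exact absurd hdot hcd
          · exact hyeq
      have hec : pvSouthCell h g i j = pvCell g i j := by
        simp only [pvSouthCell]
        rw [if_neg hmv, if_neg (by rintro ⟨hk, -⟩; exact hcd hk)]
      rw [hfind, hec, if_neg hcd]

theorem pv_south_any {h w : Int} {d : PySem.Dict (Int × Int) Char} {g : List (List Char)}
    (hInv : pvInv h w d g) :
    d.items.any (pvMovS d h) = pvSouthMoves h w g := by
  rw [Bool.eq_iff_iff]
  unfold pvSouthMoves
  simp only [List.any_eq_true, PySem.List.mem_pyRange_one]
  constructor
  · rintro ⟨a, ha, hm⟩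
    obtain ⟨habox, hane, haval⟩ := (pv_mem_items hInv a).mp ha
    rw [pv_movS_eq hInv ha] at hm
    simp only [Bool.and_eq_true, decide_eq_true_eq] at hm
    refine ⟨a.1.1, ⟨habox.1, habox.2.1⟩, a.1.2, ⟨habox.2.2.1, habox.2.2.2⟩, ?_⟩
    simp only [Bool.and_eq_true, beq_iff_eq]
    exact ⟨by rw [← haval]; exact hm.1, hm.2⟩
  · rintro ⟨i, hi, j, hj, hcond⟩
    simp only [Bool.and_eq_true, beq_iff_eq] at hcond
    have hbox : pvBox h w i j := ⟨hi.1, hi.2, hj.1, hj.2⟩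
    have hmem : (((i, j), 'v') : (Int × Int) × Char) ∈ d.items :=
      (pv_mem_items hInv _).mpr
        ⟨hbox, by show pvCell g i j ≠ '.'; rw [hcond.1]; decide,
          by show ('v' : Char) = pvCell g i j; exact hcond.1.symm⟩
    refine ⟨((i, j), 'v'), hmem, ?_⟩
    rw [pv_movS_eq hInv hmem]
    simp [hcond.2]

theorem pv_south_keys {h w : Int} {d : PySem.Dict (Int × Int) Char} {g : List (List Char)}
    (hInv : pvInv h w d g) :
    ∀ k ∈ (d.items.foldl (fun dd a => dd.insert (pvTgtS d h a) a.2) PySem.Dict.empty).keys,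
      pvBox h w k.1 k.2 := by
  intro k hk
  rcases pv_keys_foldl_insert_mem (pvTgtS d h) (fun a => a.2) d.items PySem.Dict.empty k hk
    with hk' | ⟨a, ha, rfl⟩
  · simp [PySem.Dict.keys_empty] at hk'
  · obtain ⟨habox, -, -⟩ := (pv_mem_items hInv a).mp ha
    rw [pv_tgtS_eq hInv ha]
    split_ifs with hm
    · have hb1 := habox.1
      have hb2 := habox.2.1
      have hmb := pv_mod_succ hb1 hb2
      refine ⟨?_, ?_, habox.2.2.1, habox.2.2.2⟩
      · show 0 ≤ PySem.Int.mod (a.1.1 + 1) h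
        rw [hmb]; split_ifs <;> omega
      · show PySem.Int.mod (a.1.1 + 1) h < h
        rw [hmb]; split_ifs <;> omega
    · exact habox

theorem pv_east_step {h w : Int} {d : PySem.Dict (Int × Int) Char} {g : List (List Char)}
    (hInv : pvInv h w d g) (hSh : pvShape h w g) :
    pvInv h w (pvEastFold w d).1 (pvEastGrid h w g) ∧
      (pvEastFold w d).2 = pvEastMoves h w g ∧ pvShape h w (pvEastGrid h w g) := by
  have hnd := hInv.1
  rw [pv_eastFold_eq w d hnd]
  refine ⟨⟨?_, ?_, ?_⟩, ?_, ?_⟩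
  · exact PySem.Dict.nodup_keys_foldl_insert_key d.items (pvTgtE d w) (fun _ a => a.2)
      PySem.Dict.empty PySem.Dict.nodup_keys_empty
  · exact pv_east_keys hInv
  · intro i j hb
    have hcm : pvCell (pvEastGrid h w g) i j = pvEastCell w g i j := pv_cell_map _ hb
    rw [hcm]
    exact pv_east_get? hInv hb
  · show d.items.foldl (fun b a => b || pvMovE d w a) false = pvEastMoves h w g
    rw [pv_foldl_or, Bool.false_or]
    exact pv_east_any hInv
  · exact pv_shape_map (fun i j => pvEastCell w g i j) hSh.1 hSh.2.1

theorem pv_south_step {h w : Int} {d : PySem.Dict (Int × Int) Char} {g : List (List Char)}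
    (hInv : pvInv h w d g) (hSh : pvShape h w g) (b : Bool) :
    pvInv h w (pvSouthFold h d b).1 (pvSouthGrid h w g) ∧
      (pvSouthFold h d b).2 = (b || pvSouthMoves h w g) ∧ pvShape h w (pvSouthGrid h w g) := by
  have hnd := hInv.1
  rw [pv_southFold_eq h d b hnd]
  refine ⟨⟨?_, ?_, ?_⟩, ?_, ?_⟩
  · exact PySem.Dict.nodup_keys_foldl_insert_key d.items (pvTgtS d h) (fun _ a => a.2)
      PySem.Dict.empty PySem.Dict.nodup_keys_empty
  · exact pv_south_keys hInv
  · intro i j hb'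
    have hcm : pvCell (pvSouthGrid h w g) i j = pvSouthCell h g i j := pv_cell_map _ hb'
    rw [hcm]
    exact pv_south_get? hInv hb'
  · show d.items.foldl (fun bb a => bb || pvMovS d h a) b = (b || pvSouthMoves h w g)
    rw [pv_foldl_or]
    rw [pv_south_any hInv]
  · exact pv_shape_map (fun i j => pvSouthCell h g i j) hSh.1 hSh.2.1

theorem pv_loop_eq {h w : Int} :
    ∀ (fuel : Nat) (step : Int) (d : PySem.Dict (Int × Int) Char) (g : List (List Char)),
      pvInv h w d g → pvShape h w g →
      pvLoopA h w fuel step d = pvLoopB h w fuel step g := by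
  intro fuel
  induction fuel with
  | zero => intro step d g _ _; rfl
  | succ n ih =>
    intro step d g hInv hSh
    obtain ⟨hInvE, hflagE, hShE⟩ := pv_east_step hInv hSh
    obtain ⟨hInvS, hflagS, hShS⟩ := pv_south_step hInvE hShE ((pvEastFold w d).2)
    simp only [pvLoopA, pvLoopB]
    have hcondEq : (pvSouthFold h (pvEastFold w d).1 (pvEastFold w d).2).2
        = (pvSouthMoves h w (pvEastGrid h w g) || pvEastMoves h w g) := by
      rw [hflagS, hflagE, Bool.or_comm]
    by_cases hc : (pvSouthFold h (pvEastFold w d).1 (pvEastFold w d).2).2 = false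
    · rw [if_pos hc, if_pos (by rw [← hcondEq]; exact hc)]
    · rw [if_neg hc, if_neg (fun hb => hc (by rw [hcondEq]; exact hb))]
      exact ih (step + 1) _ _ hInvS hShS

-- the row-major list of board positions
def pvPS (h w : Int) : List (Int × Int) :=
  (PySem.List.pyRange 0 h 1).flatMap fun i => (PySem.List.pyRange 0 w 1).map fun j => (i, j)

-- the parsed board (cells read through pvCellAt; default never read inside the box)
def pvGrid0 (lines : List String) (h w : Int) : List (List Char) :=
  (PySem.List.pyRange 0 h 1).map fun i =>
    (PySem.List.pyRange 0 w 1).map fun j => (pvCellAt lines i j).getD '?'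

theorem pv_mem_ps {h w : Int} (p : Int × Int) : p ∈ pvPS h w ↔ pvBox h w p.1 p.2 := by
  unfold pvPS pvBox
  simp only [List.mem_flatMap, List.mem_map, PySem.List.mem_pyRange_one]
  constructor
  · rintro ⟨i, hi, j, hj, rfl⟩
    exact ⟨hi.1, hi.2, hj.1, hj.2⟩
  · rintro ⟨h1, h2, h3, h4⟩
    exact ⟨p.1, ⟨h1, h2⟩, p.2, ⟨h3, h4⟩, rfl⟩

theorem pv_find?_self {α : Type} [DecidableEq α] [BEq α] [LawfulBEq α] (q : α) :
    ∀ (L : List α), L.find? (fun a => a == q) = if q ∈ L then some q else none := by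
  intro L
  induction L with
  | nil => simp
  | cons a L ih =>
    by_cases haq : a = q
    · subst haq; simp [List.find?]
    · have hbeq : (a == q) = false := by simp [haq]
      simp only [List.find?, hbeq, ih, List.mem_cons]
      by_cases hq : q ∈ L
      · simp [hq]
      · have hqa : ¬q = a := fun hh => haq hh.symm
        simp [hq, hqa]

theorem pv_cellAt_isSome {lines : List String} {h w i j : Int}
    (hh : (lines.length : Int) = h) (hwf : ∀ l ∈ lines, w ≤ PySem.Str.len l)
    (hb : pvBox h w i j) : (pvCellAt lines i j).isSome := by
  obtain ⟨hi0, hih, hj0, hjw⟩ := hb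
  unfold pvCellAt
  rw [PySem.List.pyGet?_of_nonneg _ hi0]
  have hilt : i.toNat < lines.length := by omega
  rw [List.getElem?_eq_getElem hilt]
  simp only [Option.bind_some]
  have hl := hwf lines[i.toNat] (List.getElem_mem hilt)
  rw [PySem.Str.len_eq] at hl
  have hj' : j = ((j.toNat : Nat) : Int) := by omega
  rw [hj', PySem.Str.pyGet?_natCast]
  rw [List.getElem?_eq_getElem (by omega)]
  simp

theorem pv_buildGrid_eq {lines : List String} {h w : Int}
    (hh : (lines.length : Int) = h) (hwf : ∀ l ∈ lines, w ≤ PySem.Str.len l) :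
    pvBuildGrid lines h w = some (pvGrid0 lines h w) := by
  unfold pvBuildGrid pvGrid0
  have hrow : ∀ i ∈ PySem.List.pyRange 0 h 1,
      (PySem.List.pyRange 0 w 1).foldl (fun racc j =>
        racc.bind fun r => (pvCellAt lines i j).map fun c => r ++ [c]) (some [])
      = some ((PySem.List.pyRange 0 w 1).map fun j => (pvCellAt lines i j).getD '?') := by
    intro i hi
    have hi' := PySem.List.mem_pyRange_one.mp hi
    rw [pv_foldl_option (fun j => pvCellAt lines i j) '?' (fun r _ c => r ++ [c]) _ _
      (fun j hj => pv_cellAt_isSome hh hwf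
        ⟨hi'.1, hi'.2, (PySem.List.mem_pyRange_one.mp hj).1,
          (PySem.List.mem_pyRange_one.mp hj).2⟩)]
    rw [PySem.List.foldl_append_singleton_eq_map]
    simp
  rw [pv_foldl_option
    (fun i => (PySem.List.pyRange 0 w 1).foldl (fun racc j =>
      racc.bind fun r => (pvCellAt lines i j).map fun c => r ++ [c]) (some []))
    [] (fun rows _ row => rows ++ [row]) _ _
    (fun i hi => by simp [hrow i hi])]
  rw [PySem.List.foldl_append_singleton_eq_map]
  rw [List.nil_append]
  congr 1
  apply List.map_congr_left
  intro i hi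
  simp [hrow i hi]

set_option maxHeartbeats 1000000 in
theorem pv_build {lines : List String} {h w : Int} (hh : (lines.length : Int) = h)
    (hwf : ∀ l ∈ lines, w ≤ PySem.Str.len l) :
    ∃ D, pvBuildHerds lines h w = some D ∧ pvInv h w D (pvGrid0 lines h w) := by
  have hall : ∀ p ∈ pvPS h w, (pvCellAt lines p.1 p.2).isSome :=
    fun p hp => pv_cellAt_isSome hh hwf ((pv_mem_ps p).mp hp)
  have hflat : pvBuildHerds lines h w = (pvPS h w).foldl (fun acc p =>
      acc.bind fun dd => (pvCellAt lines p.1 p.2).map fun c =>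
        if c ≠ '.' then dd.insert p c else dd) (some PySem.Dict.empty) := by
    unfold pvBuildHerds pvPS
    rw [pv_foldl_flatMap]
    simp only [List.foldl_map]
  have heq : pvBuildHerds lines h w = some
      (((pvPS h w).filter fun p => decide ((pvCellAt lines p.1 p.2).getD '?' ≠ '.')).foldl
        (fun dd p => dd.insert p ((pvCellAt lines p.1 p.2).getD '?')) PySem.Dict.empty) := by
    rw [hflat, pv_foldl_option (fun (p : Int × Int) => pvCellAt lines p.1 p.2) '?'
      (fun (dd : PySem.Dict (Int × Int) Char) (p : Int × Int) (c : Char) =>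
        if c ≠ '.' then dd.insert p c else dd) _ _ hall,
      PySem.List.foldl_ite_eq_foldl_filter
        (fun (p : Int × Int) => (pvCellAt lines p.1 p.2).getD '?' ≠ '.')
        (fun (dd : PySem.Dict (Int × Int) Char) (p : Int × Int) =>
          dd.insert p ((pvCellAt lines p.1 p.2).getD '?'))]
  refine ⟨_, heq, ?_, ?_, ?_⟩
  · exact PySem.Dict.nodup_keys_foldl_insert_key _ (fun (p : Int × Int) => p)
      (fun _ (p : Int × Int) => (pvCellAt lines p.1 p.2).getD '?') PySem.Dict.empty
      PySem.Dict.nodup_keys_empty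
  · intro k hk
    rcases pv_keys_foldl_insert_mem (fun (p : Int × Int) => p)
      (fun (p : Int × Int) => (pvCellAt lines p.1 p.2).getD '?') _ PySem.Dict.empty k hk
      with hk' | ⟨q, hq, hkq⟩
    · simp [PySem.Dict.keys_empty] at hk'
    · have hbq := (pv_mem_ps q).mp (List.mem_filter.mp hq).1
      rw [hkq]
      exact hbq
  · intro i j hb
    have hcm : pvCell (pvGrid0 lines h w) i j = (pvCellAt lines i j).getD '?' :=
      pv_cell_map _ hb
    rw [hcm, pv_get?_foldl_insert, pv_find?_self]
    by_cases hc : (pvCellAt lines i j).getD '?' = '.'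
    · have hnin : ((i, j) : Int × Int) ∉
          (((pvPS h w).filter fun p =>
            decide ((pvCellAt lines p.1 p.2).getD '?' ≠ '.'))).reverse := by
        simp [List.mem_reverse, List.mem_filter, hc]
      rw [if_neg hnin, if_pos hc]
      simp [PySem.Dict.get?_empty]
    · have hmem : ((i, j) : Int × Int) ∈
          (((pvPS h w).filter fun p =>
            decide ((pvCellAt lines p.1 p.2).getD '?' ≠ '.'))).reverse := by
        rw [List.mem_reverse, List.mem_filter]
        exact ⟨(pv_mem_ps _).mpr hb, by simpa using hc⟩
      rw [if_pos hmem, if_neg hc]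

-- ===== VERDICT (by name: the statement is the Claim_ definition above) =====
theorem part1_spec : Claim_equal_part1 := by
  unfold Claim_equal_part1
  intro inp hdom hpre
  unfold Spec_part1
  cases hlines : PySem.Str.splitlines inp with
  | nil => simp [Pre_part1, hlines] at hpre
  | cons l0 rest =>
    simp only [Pre_part1, hlines, List.headI] at hpre
    obtain ⟨-, hwf, -⟩ := hpre
    have hw0 : 0 ≤ PySem.Str.len l0 := by rw [PySem.Str.len_eq]; omega
    obtain ⟨D, hD, hInv⟩ :=
      pv_build (lines := l0 :: rest) (w := PySem.Str.len l0) rfl hwf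
    have hG := pv_buildGrid_eq (lines := l0 :: rest) (w := PySem.Str.len l0) rfl hwf
    have hSh : pvShape (((l0 :: rest).length : Nat) : Int) (PySem.Str.len l0)
        (pvGrid0 (l0 :: rest) (((l0 :: rest).length : Nat) : Int) (PySem.Str.len l0)) :=
      pv_shape_map _ (by omega) hw0
    simp only [part1, part1_alt, hlines, PySem.List.pyGet?_zero_cons]
    rw [hD, hG]
    exact pv_loop_eq _ 1 D _ hInv hSh
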